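-- pv_equiv track=rewrite | github.com/takuuo2/Latest_Quality_Digital_Twin_Sys | pages/edit.py | get_data_after_catalog_id
-- ===== SOURCE A (Python) =====
-- def get_data_after_catalog_id(data):
--     # catalog_idが見つかるまでのフラグ
--     found_catalog_id = False
--     result = {}
--
--     # 順番に辞書を走査
--     for key, value in data.items():
--         # catalog_idが見つかったらその後のデータを保存する
--         if found_catalog_id:
--             result[key] = value
--         if key == 'catalog_id':
--             found_catalog_id = True
--
--     return result
-- ===== SOURCE B (Python) =====
-- def get_data_after_catalog_id(data):
--     # Walk the entries back-to-front, gathering them until the 'catalog_id'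
--     # key is reached (dict keys are unique, so this is the same pivot);
--     # if the pivot is never met, nothing comes after it.
--     tail = []
--     for key, value in reversed(data.items()):
--         if key == 'catalog_id':
--             tail.reverse()
--             return dict(tail)
--         tail.append((key, value))
--     return {}
-- ===== Notes on version B (the rewrite author's own statement) =====
-- stated objective: alternative
-- what changed: Replaces the forward scan carrying a boolean flag and a growing result dict with a backward walk over reversed(data.items()) that accumulates entries until it meets 'catalog_id' and returns early (empty dict if the walk finishes without meeting it); Pre_ restricts the association-list encoding to distinct keys, which is what a Python dict argument guarantees.
import Mathlib
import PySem

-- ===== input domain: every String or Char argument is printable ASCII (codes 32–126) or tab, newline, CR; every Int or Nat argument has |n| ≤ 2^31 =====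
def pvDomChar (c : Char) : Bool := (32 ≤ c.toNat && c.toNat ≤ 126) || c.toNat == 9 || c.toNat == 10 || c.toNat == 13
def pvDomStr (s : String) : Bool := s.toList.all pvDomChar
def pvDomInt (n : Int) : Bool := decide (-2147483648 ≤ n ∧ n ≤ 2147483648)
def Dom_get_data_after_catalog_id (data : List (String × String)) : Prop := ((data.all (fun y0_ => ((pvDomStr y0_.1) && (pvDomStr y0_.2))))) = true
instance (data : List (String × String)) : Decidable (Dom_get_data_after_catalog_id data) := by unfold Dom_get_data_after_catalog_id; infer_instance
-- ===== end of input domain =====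

-- B walks the entries back-to-front with an early return at 'catalog_id' instead of A's forward boolean-flag scan; return-value equivalence on duplicate-free (i.e. dict-valid) association lists.


-- ===== PORT A =====
-- A: one forward scan carrying a boolean flag; once the flag is set each entry is inserted into the result dict.
def get_data_after_catalog_id (data : List (String × String)) : List (String × String) :=
  (data.foldl
    (fun (st : Bool × PySem.Dict String String) kv =>
      let st1 := if st.1 then (st.1, st.2.insert kv.1 kv.2) else st
      if kv.1 == "catalog_id" then (true, st1.2) else st1)
    (false, PySem.Dict.empty)).2.items

-- ===== PORT B =====
-- B's loop over reversed(data.items()): append items until 'catalog_id' is met, then reverse the tail and dict() it; [] if the loop runs out.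
def pvRevScan (l : List (String × String)) (tail : List (String × String)) : List (String × String) :=
  match l with
  | [] => []
  | kv :: t =>
    if kv.1 == "catalog_id" then (PySem.Dict.ofList tail.reverse).items
    else pvRevScan t (tail ++ [kv])

def get_data_after_catalog_id_alt (data : List (String × String)) : List (String × String) :=
  pvRevScan data.reverse []

-- ===== PRECONDITION & SPEC =====
-- Pre_ excludes association lists with duplicate keys: they do not encode a Python dict (the argument is a dict, whose keys are unique), so A's and B's values there are artefacts of the encoding.
def Pre_get_data_after_catalog_id (data : List (String × String)) : Prop :=
  (data.map Prod.fst).Nodup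
instance (data : List (String × String)) : Decidable (Pre_get_data_after_catalog_id data) := by unfold Pre_get_data_after_catalog_id; infer_instance

def pvWitness_get_data_after_catalog_id : (List (String × String)) :=
  [("catalog_id", "1"), ("a", "2")]

def Spec_get_data_after_catalog_id (data : List (String × String)) (out : List (String × String)) : Prop := out = get_data_after_catalog_id_alt data
instance (data : List (String × String)) (out : List (String × String)) : Decidable (Spec_get_data_after_catalog_id data out) := by unfold Spec_get_data_after_catalog_id; infer_instance

-- ===== CLAIM (what is proved, stated in full; the proofs are below) =====
def Claim_equal_get_data_after_catalog_id : Prop := ∀ (data : List (String × String)), Dom_get_data_after_catalog_id data → Pre_get_data_after_catalog_id data → Spec_get_data_after_catalog_id data (get_data_after_catalog_id data)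

-- ===== LEMMAS AND PROOFS =====

-- Once A's flag is true, the rest of its loop is exactly the insert-fold that dict() performs.
theorem flag_true_loop (l : List (String × String)) (d : PySem.Dict String String) :
    l.foldl
      (fun (st : Bool × PySem.Dict String String) kv =>
        let st1 := if st.1 then (st.1, st.2.insert kv.1 kv.2) else st
        if kv.1 == "catalog_id" then (true, st1.2) else st1)
      (true, d)
    = (true, l.foldl (fun d kv => d.insert kv.1 kv.2) d) := by
  induction l generalizing d with
  | nil => rfl
  | cons kv t ih =>
      rw [List.foldl_cons,
        show (let st1 := if (true, d).1 = true then ((true, d).1, (true, d).2.insert kv.1 kv.2) else (true, d);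
              if (kv.1 == "catalog_id") = true then (true, st1.2) else st1)
          = (true, d.insert kv.1 kv.2) from by by_cases h : kv.1 == "catalog_id" <;> simp [h],
        List.foldl_cons]
      exact ih _

-- A's value: items of the dict of the suffix after the first 'catalog_id' entry.
theorem portA_eq_suffix (data : List (String × String)) :
    get_data_after_catalog_id data
    = (PySem.Dict.ofList ((data.dropWhile (fun kv => kv.1 != "catalog_id")).drop 1)).items := by
  unfold get_data_after_catalog_id
  induction data with
  | nil => rfl
  | cons kv t ih =>
      rw [List.foldl_cons, List.dropWhile_cons]
      by_cases h : kv.1 = "catalog_id"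
      · rw [show (let st1 := if (false, PySem.Dict.empty (κ := String) (ν := String)).1 = true
                  then ((false, PySem.Dict.empty).1, (false, PySem.Dict.empty (κ := String) (ν := String)).2.insert kv.1 kv.2) else (false, PySem.Dict.empty);
                if (kv.1 == "catalog_id") = true then (true, st1.2) else st1)
            = ((true, PySem.Dict.empty) : Bool × PySem.Dict String String) from by simp [h]]
        rw [flag_true_loop, if_neg (by simp [h])]
        rfl
      · rw [show (let st1 := if (false, PySem.Dict.empty (κ := String) (ν := String)).1 = true
                  then ((false, PySem.Dict.empty).1, (false, PySem.Dict.empty (κ := String) (ν := String)).2.insert kv.1 kv.2) else (false, PySem.Dict.empty);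
                if (kv.1 == "catalog_id") = true then (true, st1.2) else st1)
            = ((false, PySem.Dict.empty) : Bool × PySem.Dict String String) from by simp [h]]
        rw [if_pos (by simp [h])]
        exact ih

-- B's reverse scan never meeting 'catalog_id' yields [].
theorem revScan_none (l tail : List (String × String))
    (h : ∀ kv ∈ l, kv.1 ≠ "catalog_id") : pvRevScan l tail = [] := by
  induction l generalizing tail with
  | nil => rfl
  | cons kv t ih =>
      rw [pvRevScan, if_neg (by simpa using h kv (List.mem_cons_self))]
      exact ih _ (fun x hx => h x (List.mem_cons_of_mem _ hx))

-- B's reverse scan stopping at the first 'catalog_id' of its input returns the dict of the accumulated tail reversed.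
theorem revScan_stop (l : List (String × String)) (x : String × String) (r tail : List (String × String))
    (hx : x.1 = "catalog_id") (h : ∀ kv ∈ l, kv.1 ≠ "catalog_id") :
    pvRevScan (l ++ x :: r) tail = (PySem.Dict.ofList (tail ++ l).reverse).items := by
  induction l generalizing tail with
  | nil => simp [pvRevScan, hx]
  | cons kv t ih =>
      rw [List.cons_append, pvRevScan, if_neg (by simpa using h kv (List.mem_cons_self))]
      rw [ih _ (fun y hy => h y (List.mem_cons_of_mem _ hy))]
      simp

theorem ports_agree (data : List (String × String))
    (hnd : (data.map Prod.fst).Nodup) :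
    get_data_after_catalog_id data = get_data_after_catalog_id_alt data := by
  rw [portA_eq_suffix]
  unfold get_data_after_catalog_id_alt
  rcases hsplit : data.dropWhile (fun kv => kv.1 != "catalog_id") with _ | ⟨x, suf⟩
  · -- no 'catalog_id' anywhere
    have hall : ∀ kv ∈ data, kv.1 ≠ "catalog_id" := by
      intro kv hkv
      have := (List.dropWhile_eq_nil_iff).1 hsplit kv hkv
      simpa using this
    rw [revScan_none _ _ (fun kv hkv => hall kv (List.mem_reverse.1 hkv)), hsplit]
    rfl
  · -- data = pre ++ x :: suf, x.1 = "catalog_id", no 'catalog_id' in pre nor (by Nodup) in suf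
    have hdata : data = data.takeWhile (fun kv => kv.1 != "catalog_id") ++ x :: suf := by
      rw [← hsplit, List.takeWhile_append_dropWhile]
    have hx : x.1 = "catalog_id" := by
      have := List.head?_dropWhile_not (fun kv => kv.1 != "catalog_id") data
      rw [hsplit] at this
      simpa using this
    have hpre : ∀ kv ∈ data.takeWhile (fun kv => kv.1 != "catalog_id"), kv.1 ≠ "catalog_id" := by
      intro kv hkv
      simpa using List.mem_takeWhile_imp hkv
    have hsuf : ∀ kv ∈ suf, kv.1 ≠ "catalog_id" := by
      intro kv hkv hkv1
      have hnd' : ((data.takeWhile (fun kv => kv.1 != "catalog_id") ++ x :: suf).map Prod.fst).Nodup := by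
        rw [← hdata]; exact hnd
      rw [List.map_append, List.map_cons] at hnd'
      have := (List.nodup_append.1 hnd').2.1
      exact (List.nodup_cons.1 this).1 (by
        rw [hx, ← hkv1]; exact List.mem_map_of_mem hkv)
    calc (PySem.Dict.ofList ((data.dropWhile (fun kv => kv.1 != "catalog_id")).drop 1)).items
        = (PySem.Dict.ofList suf).items := by rw [hsplit]; rfl
      _ = pvRevScan data.reverse [] := by
            rw [hdata, List.reverse_append, List.reverse_cons, List.append_assoc,
              List.singleton_append,
              revScan_stop _ x _ [] hx (fun kv hkv => hsuf kv (List.mem_reverse.1 hkv))]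
            simp

-- ===== VERDICT (by name: the statement is the Claim_ definition above) =====
theorem get_data_after_catalog_id_spec : Claim_equal_get_data_after_catalog_id := by
  intro data _ hpre
  exact ports_agree data hpre
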